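-- pv_equiv track=rewrite | github.com/xysticus/braid-blackboard | programmes/NouvAutoMorph.py | calcule_arcs
-- ===== SOURCE A (Python) =====
-- def calcule_arcs(liste):
--     '''Prend une liste de générateurs de fn et calcule les arcs correspondant.
--     Les arcs du haut aux indices pairs ceux du bas aux indices impairs.
--     Renvoie une liste de couples qui est la liste des extrémités des arcs.
--     Le signe des extrémités des arcs donne le sens de l'arc.'''
--     debut = liste[0]
--     courant = liste[0]
--     resultat = []
--     for i in range(1,len(liste)):
--         match liste[i]:
--             # on est sur une suite monotone, on continue
--             case t if t - courant == 1: courant = t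
--
--             # une suite monotone se termine faut écrire les arcs
--             case t :
--                 resultat.append((debut, courant)) # on écrit l'arc du haut
--
--                 # pour l'arc du bas ça se complique
--                 signe_bas = 1 if abs(t) - abs(courant) < 0 else - 1 # on calcule le sens de l'arc
--
--                 # bon bhen là c'est des cas à gérer en fonction du fait que l'on arrive
--                 # par le dedans de l'arc du bas ou pas et de si on est à gauche ou à droite.
--                 if signe_bas < 0:
--                     tt = abs(courant) + 1 if courant > 0 else abs(courant)
--                     qq = abs(t) - 1 if t > 0 else abs(t)
--                 else:
--                     tt = abs(courant) if courant > 0 else abs(courant) - 1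
--                     qq = abs(t) if t > 0 else abs(t) + 1
--                 resultat.append((tt * signe_bas, qq * signe_bas)) # on écrit l'arc du bas en rajoutant son signe
--                 courant = t
--                 debut = t
--
--     # on écrit le dernier arc. C'est un arc du haut.
--     resultat.append((debut, courant))
--     return resultat
-- ===== SOURCE B (Python) =====
-- def _arc_bas(courant, t):
--     signe = 1 if abs(t) - abs(courant) < 0 else -1
--     if signe < 0:
--         tt = abs(courant) + 1 if courant > 0 else abs(courant)
--         qq = abs(t) - 1 if t > 0 else abs(t)
--     else:
--         tt = abs(courant) if courant > 0 else abs(courant) - 1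
--         qq = abs(t) if t > 0 else abs(t) + 1
--     return (tt * signe, qq * signe)
--
-- def calcule_arcs(liste):
--     # Pass 1: group liste into maximal +1-increment runs, each kept as (first, last).
--     runs = []
--     start = prev = liste[0]
--     for t in liste[1:]:
--         if t - prev == 1:
--             prev = t
--         else:
--             runs.append((start, prev))
--             start = prev = t
--     runs.append((start, prev))
--     # Pass 2: interleave top arcs (the runs) with the bottom arcs between them.
--     resultat = [runs[0]]
--     for i in range(1, len(runs)):
--         resultat.append(_arc_bas(runs[i - 1][1], runs[i][0]))
--         resultat.append(runs[i])
--     return resultat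
-- ===== Notes on version B (the rewrite author's own statement) =====
-- stated objective: alternative
-- what changed: B first groups the input into maximal +1-increment runs in one pass, then in a second pass interleaves the top arcs (the runs) with the bottom arcs computed between adjacent runs, instead of A's single loop that writes arcs while tracking debut/courant state.
-- outside the precondition, e.g. on calcule_arcs([]): A raises IndexError, B raises IndexError
import Mathlib
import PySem

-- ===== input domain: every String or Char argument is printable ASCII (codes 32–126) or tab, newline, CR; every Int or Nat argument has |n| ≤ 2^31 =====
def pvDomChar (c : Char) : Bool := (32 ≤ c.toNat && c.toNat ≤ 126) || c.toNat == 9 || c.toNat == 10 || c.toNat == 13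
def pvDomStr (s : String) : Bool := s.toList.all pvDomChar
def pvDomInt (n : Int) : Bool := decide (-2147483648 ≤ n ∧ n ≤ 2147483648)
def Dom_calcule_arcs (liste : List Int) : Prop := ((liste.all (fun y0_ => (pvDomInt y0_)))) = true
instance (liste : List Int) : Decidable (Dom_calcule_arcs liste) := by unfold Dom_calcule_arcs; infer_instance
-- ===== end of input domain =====

-- B groups the list into maximal +1-runs first, then interleaves top and bottom arcs; same O(n) cost, different decomposition.

-- ===== PORT A =====
-- A's single loop over liste[1:], carrying (debut, courant, resultat); the final
-- top arc is appended after the loop.  (liste[i] for i in range(1, len(liste))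
-- visits exactly the elements of liste.tail, in order.)
def pvStepA (s : Int × Int × List (Int × Int)) (t : Int) : Int × Int × List (Int × Int) :=
  let debut := s.1
  let courant := s.2.1
  let resultat := s.2.2
  if t - courant = 1 then (debut, t, resultat)
  else
    let signe_bas : Int := if |t| - |courant| < 0 then 1 else -1
    let p : Int × Int :=
      if signe_bas < 0 then
        ((if courant > 0 then |courant| + 1 else |courant|),
         (if t > 0 then |t| - 1 else |t|))
      else
        ((if courant > 0 then |courant| else |courant| - 1),
         (if t > 0 then |t| else |t| + 1))
    (t, t, resultat ++ [(debut, courant), (p.1 * signe_bas, p.2 * signe_bas)])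

def calcule_arcs (liste : List Int) : List (Int × Int) :=
  match liste with
  | [] => []   -- Python raises IndexError on liste[0]; excluded by Pre_
  | x :: rest =>
    let st := rest.foldl pvStepA (x, x, [])
    st.2.2 ++ [(st.1, st.2.1)]

-- ===== PORT B =====
def pvArcBas (courant t : Int) : Int × Int :=
  let signe : Int := if |t| - |courant| < 0 then 1 else -1
  if signe < 0 then
    ((if courant > 0 then |courant| + 1 else |courant|) * signe,
     (if t > 0 then |t| - 1 else |t|) * signe)
  else
    ((if courant > 0 then |courant| else |courant| - 1) * signe,
     (if t > 0 then |t| else |t| + 1) * signe)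

-- pass 1: maximal +1-increment runs, each as (first, last)
def pvRuns (start prev : Int) : List Int → List (Int × Int)
  | [] => [(start, prev)]
  | t :: rest => if t - prev = 1 then pvRuns start t rest
                 else (start, prev) :: pvRuns t t rest

-- pass 2: interleave top arcs (runs) with bottom arcs between adjacent runs
def pvWeave (r : Int × Int) : List (Int × Int) → List (Int × Int)
  | [] => [r]
  | r2 :: rs => r :: pvArcBas r.2 r2.1 :: pvWeave r2 rs

def calcule_arcs_alt (liste : List Int) : List (Int × Int) :=
  match liste with
  | [] => []   -- B's Python also raises IndexError here; excluded by Pre_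
  | x :: rest =>
    match pvRuns x x rest with
    | [] => []          -- unreachable: pvRuns never returns []
    | r :: rs => pvWeave r rs

-- ===== PRECONDITION & SPEC =====
-- Pre_ excludes only the empty list, on which A (liste[0]) raises IndexError.
def Pre_calcule_arcs (liste : List Int) : Prop := liste ≠ []
instance (liste : List Int) : Decidable (Pre_calcule_arcs liste) := by unfold Pre_calcule_arcs; infer_instance
def pvWitness_calcule_arcs : List Int := [1, 2, -4, 5]

def Spec_calcule_arcs (liste : List Int) (out : List (Int × Int)) : Prop := out = calcule_arcs_alt liste
instance (liste : List Int) (out : List (Int × Int)) : Decidable (Spec_calcule_arcs liste out) := by unfold Spec_calcule_arcs; infer_instance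

-- ===== CLAIM (what is proved, stated in full; the proofs are below) =====
def Claim_equal_calcule_arcs : Prop := ∀ (liste : List Int), Dom_calcule_arcs liste → Pre_calcule_arcs liste → Spec_calcule_arcs liste (calcule_arcs liste)

-- ===== LEMMAS AND PROOFS =====

-- the first run produced by pvRuns starts at `start`
theorem pvRuns_head (rest : List Int) : ∀ (start prev : Int),
    ∃ y rs, pvRuns start prev rest = (start, y) :: rs := by
  induction rest with
  | nil => intro s p; exact ⟨p, [], rfl⟩
  | cons t rest ih =>
    intro s p
    simp only [pvRuns]
    split
    · exact ih s t
    · obtain ⟨y, rs, h⟩ := ih t t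
      exact ⟨p, pvRuns t t rest, rfl⟩

-- A's inline bottom-arc arithmetic is pvArcBas
theorem stepA_bas (d c t : Int) (acc : List (Int × Int)) (h : ¬ t - c = 1) :
    pvStepA (d, c, acc) t = (t, t, acc ++ [(d, c), pvArcBas c t]) := by
  unfold pvStepA pvArcBas
  rw [if_neg h]
  by_cases hs : |t| - |c| < 0 <;> norm_num [hs]

def pvWeaveAll : List (Int × Int) → List (Int × Int)
  | [] => []
  | r :: rs => pvWeave r rs

-- main invariant: A's loop from state (d, c, acc) produces acc ++ weave of the runs
theorem loop_eq (rest : List Int) : ∀ (d c : Int) (acc : List (Int × Int)),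
    (let st := rest.foldl pvStepA (d, c, acc); st.2.2 ++ [(st.1, st.2.1)])
      = acc ++ pvWeaveAll (pvRuns d c rest) := by
  induction rest with
  | nil => intro d c acc; simp [pvRuns, pvWeaveAll, pvWeave]
  | cons t rest ih =>
    intro d c acc
    by_cases h : t - c = 1
    · have : pvStepA (d, c, acc) t = (d, t, acc) := by simp [pvStepA, h]
      simp only [List.foldl_cons, this, pvRuns, if_pos h]
      exact ih d t acc
    · simp only [List.foldl_cons, stepA_bas d c t acc h, pvRuns, if_neg h]
      rw [ih t t (acc ++ [(d, c), pvArcBas c t])]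
      obtain ⟨y, rs, hr⟩ := pvRuns_head rest t t
      simp [hr, pvWeaveAll, pvWeave]

-- ===== VERDICT (by name: the statement is the Claim_ definition above) =====
theorem calcule_arcs_spec : Claim_equal_calcule_arcs := by
  unfold Claim_equal_calcule_arcs
  intro liste _ hpre
  unfold Spec_calcule_arcs
  match liste with
  | [] => exact absurd rfl hpre
  | x :: rest =>
    show (let st := rest.foldl pvStepA (x, x, []); st.2.2 ++ [(st.1, st.2.1)])
        = calcule_arcs_alt (x :: rest)
    rw [loop_eq rest x x []]
    obtain ⟨y, rs, hr⟩ := pvRuns_head rest x x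
    simp [calcule_arcs_alt, hr, pvWeaveAll]
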